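-- pv_equiv track=rewrite | github.com/VaidhyaMegha/samyama-trial-enrollment-agent | scripts/add_criteria_text.py | generate_criteria_text
-- ===== SOURCE A (Python) =====
-- def generate_criteria_text(parsed_criteria):
--     """Generate human-readable criteria text from parsed criteria."""
--     inclusion_criteria = []
--     exclusion_criteria = []
--
--     for criterion in parsed_criteria:
--         desc = criterion.get('description', '')
--         criterion_type = criterion.get('type', '')
--
--         if criterion_type == 'inclusion':
--             inclusion_criteria.append(f"- {desc}")
--         elif criterion_type == 'exclusion':
--             exclusion_criteria.append(f"- {desc}")
--
--     text_parts = []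
--
--     if inclusion_criteria:
--         text_parts.append("Inclusion Criteria:")
--         text_parts.extend(inclusion_criteria)
--
--     if exclusion_criteria:
--         if inclusion_criteria:
--             text_parts.append("")  # Empty line between sections
--         text_parts.append("Exclusion Criteria:")
--         text_parts.extend(exclusion_criteria)
--
--     return "\n".join(text_parts)
-- ===== SOURCE B (Python) =====
-- def generate_criteria_text(parsed_criteria):
--     """Generate human-readable criteria text from parsed criteria."""
--     # Traverse the list back-to-front, building each section's text directly as a
--     # string by prepending lines -- no intermediate lists and no join call.
--     inc = ""
--     exc = ""
--     for c in reversed(parsed_criteria):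
--         line = "- " + c.get('description', '')
--         t = c.get('type', '')
--         if t == 'inclusion':
--             inc = line + ("\n" + inc if inc else "")
--         elif t == 'exclusion':
--             exc = line + ("\n" + exc if exc else "")
--     if inc:
--         inc = "Inclusion Criteria:\n" + inc
--     if exc:
--         exc = "Exclusion Criteria:\n" + exc
--     if inc and exc:
--         return inc + "\n\n" + exc
--     return inc or exc
-- ===== Notes on version B (the rewrite author's own statement) =====
-- stated objective: alternative
-- what changed: B replaces A's list-accumulate-then-join pipeline (two line lists, a flat text_parts list with a conditional empty-line sentinel, '\n'.join) with a back-to-front traversal that builds each section's text directly as a string by prepending lines, then concatenates the two section strings.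
import Mathlib
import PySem

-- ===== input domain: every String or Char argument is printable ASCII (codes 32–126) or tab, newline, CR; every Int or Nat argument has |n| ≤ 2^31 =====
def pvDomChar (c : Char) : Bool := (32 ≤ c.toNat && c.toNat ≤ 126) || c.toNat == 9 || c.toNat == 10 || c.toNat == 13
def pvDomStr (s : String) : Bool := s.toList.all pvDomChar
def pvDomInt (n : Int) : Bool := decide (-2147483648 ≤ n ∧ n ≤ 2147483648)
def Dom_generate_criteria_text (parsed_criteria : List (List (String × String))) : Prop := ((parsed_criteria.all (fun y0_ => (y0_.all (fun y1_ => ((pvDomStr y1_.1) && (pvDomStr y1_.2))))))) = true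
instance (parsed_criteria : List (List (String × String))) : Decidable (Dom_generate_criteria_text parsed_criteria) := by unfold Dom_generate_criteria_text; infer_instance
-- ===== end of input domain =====

-- B replaces A's list-accumulate-then-join pipeline with a back-to-front traversal building each
-- section's text directly as a string, no intermediate lists and no join (objective: alternative).

-- ===== PORT A =====
-- one loop pass appending to the two accumulators, exactly as A's for-loop
def gctA_step (acc : List String × List String) (criterion : List (String × String)) :
    List String × List String :=
  let d := PySem.Dict.ofList criterion
  let desc := d.getD "description" ""
  let t := d.getD "type" ""
  if t == "inclusion" then (acc.1 ++ ["- " ++ desc], acc.2)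
  else if t == "exclusion" then (acc.1, acc.2 ++ ["- " ++ desc])
  else acc

def generate_criteria_text (parsed_criteria : List (List (String × String))) : String :=
  let acc := parsed_criteria.foldl gctA_step ([], [])
  let inclusion_criteria := acc.1
  let exclusion_criteria := acc.2
  let text_parts : List String := []
  let text_parts :=
    if inclusion_criteria = [] then text_parts
    else text_parts ++ ["Inclusion Criteria:"] ++ inclusion_criteria
  let text_parts :=
    if exclusion_criteria = [] then text_parts
    else text_parts ++ (if inclusion_criteria = [] then [] else [""])
           ++ ["Exclusion Criteria:"] ++ exclusion_criteria
  PySem.Str.join "\n" text_parts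

-- ===== PORT B =====
-- Source B's reversed-loop: back-to-front traversal building the two section strings by prepending
-- lines (a reversed loop with accumulators = this structural recursion on the list)
def gctB_go : List (List (String × String)) → String × String
  | [] => ("", "")
  | c :: rest =>
    let p := gctB_go rest
    let d := PySem.Dict.ofList c
    let line := "- " ++ d.getD "description" ""
    let t := d.getD "type" ""
    if t == "inclusion" then
      (line ++ (if p.1 == "" then "" else "\n" ++ p.1), p.2)
    else if t == "exclusion" then
      (p.1, line ++ (if p.2 == "" then "" else "\n" ++ p.2))
    else p

def generate_criteria_text_alt (parsed_criteria : List (List (String × String))) : String :=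
  let p := gctB_go parsed_criteria
  let inc := if p.1 == "" then "" else "Inclusion Criteria:\n" ++ p.1
  let exc := if p.2 == "" then "" else "Exclusion Criteria:\n" ++ p.2
  if inc != "" && exc != "" then inc ++ "\n\n" ++ exc
  else if inc != "" then inc else exc

-- ===== PRECONDITION & SPEC =====
def Spec_generate_criteria_text (parsed_criteria : List (List (String × String))) (out : String) : Prop := out = generate_criteria_text_alt parsed_criteria
instance (parsed_criteria : List (List (String × String))) (out : String) : Decidable (Spec_generate_criteria_text parsed_criteria out) := by unfold Spec_generate_criteria_text; infer_instance

-- ===== CLAIM (what is proved, stated in full; the proofs are below) =====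
def Claim_equal_generate_criteria_text : Prop := ∀ (parsed_criteria : List (List (String × String))), Dom_generate_criteria_text parsed_criteria → Spec_generate_criteria_text parsed_criteria (generate_criteria_text parsed_criteria)

-- ===== LEMMAS AND PROOFS =====

-- the two formatted sections, as lists of lines (proof-only characterisation)
def gctIncs (pc : List (List (String × String))) : List String :=
  (pc.filter (fun c => (PySem.Dict.ofList c).getD "type" "" == "inclusion")).map
    (fun c => "- " ++ (PySem.Dict.ofList c).getD "description" "")

def gctExcs (pc : List (List (String × String))) : List String :=
  (pc.filter (fun c => (PySem.Dict.ofList c).getD "type" "" == "exclusion")).map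
    (fun c => "- " ++ (PySem.Dict.ofList c).getD "description" "")

-- A's loop accumulates exactly the two sections
theorem gct_fold_eq (pc : List (List (String × String))) (a b : List String) :
    pc.foldl gctA_step (a, b) = (a ++ gctIncs pc, b ++ gctExcs pc) := by
  induction pc generalizing a b with
  | nil => simp [gctIncs, gctExcs]
  | cons c rest ih =>
    simp only [List.foldl_cons, gctA_step]
    by_cases h1 : (PySem.Dict.ofList c).getD "type" "" = "inclusion"
    · simp [h1, ih, gctIncs, gctExcs]
    · by_cases h2 : (PySem.Dict.ofList c).getD "type" "" = "exclusion"
      · simp [h2, ih, gctIncs, gctExcs]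
      · simp [h1, h2, ih, gctIncs, gctExcs]

theorem gct_dash_ne (d X : String) : ("- " ++ d ++ X) ≠ "" := by
  intro h
  have := congrArg String.toList h
  simp [String.toList_append] at this

theorem gct_join_nil (sep : String) : PySem.Str.join sep [] = "" := rfl

theorem gct_join_singleton (sep s : String) : PySem.Str.join sep [s] = s := by
  apply String.toList_inj.mp
  simp [PySem.Str.toList_join, PySem.Chars.join_singleton]

theorem gct_join_pair (sep x y : String) :
    PySem.Str.join sep [x, y] = x ++ sep ++ y := by
  apply String.toList_inj.mp
  simp [PySem.Str.toList_join, PySem.Chars.join_cons_cons, PySem.Chars.join_singleton,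
    String.toList_append]

theorem gct_join_cons (s : String) (l : List String) (hl : l ≠ []) :
    PySem.Str.join "\n" (s :: l) = s ++ "\n" ++ PySem.Str.join "\n" l := by
  obtain ⟨y, r, rfl⟩ := List.exists_cons_of_ne_nil hl
  apply String.toList_inj.mp
  simp only [PySem.Str.toList_join, List.map_cons, String.toList_append,
    PySem.Chars.join_cons_cons]

-- B's back-to-front pass computes the join of each section, and is "" exactly when the section is empty
theorem gct_go_eq (pc : List (List (String × String))) :
    gctB_go pc = (PySem.Str.join "\n" (gctIncs pc), PySem.Str.join "\n" (gctExcs pc))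
      ∧ ((gctB_go pc).1 = "" ↔ gctIncs pc = [])
      ∧ ((gctB_go pc).2 = "" ↔ gctExcs pc = []) := by
  induction pc with
  | nil =>
    refine ⟨rfl, ?_, ?_⟩ <;> simp [gctB_go, gctIncs, gctExcs]
  | cons c rest ih =>
    obtain ⟨heq, h1, h2⟩ := ih
    have h1' : (PySem.Str.join "\n" (gctIncs rest) = "") ↔ gctIncs rest = [] := by
      rw [heq] at h1; simpa using h1
    have h2' : (PySem.Str.join "\n" (gctExcs rest) = "") ↔ gctExcs rest = [] := by
      rw [heq] at h2; simpa using h2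
    simp only [gctB_go, heq]
    by_cases t1 : (PySem.Dict.ofList c).getD "type" "" = "inclusion"
    · have hI : gctIncs (c :: rest)
          = ("- " ++ (PySem.Dict.ofList c).getD "description" "") :: gctIncs rest := by
        simp [gctIncs, t1]
      have hE : gctExcs (c :: rest) = gctExcs rest := by
        have t2 : ¬ (PySem.Dict.ofList c).getD "type" "" = "exclusion" := by
          rw [t1]; decide
        simp [gctExcs, t2]
      by_cases hi : gctIncs rest = []
      · have hz : PySem.Str.join "\n" (gctIncs rest) = "" := h1'.mpr hi
        refine ⟨?_, ?_, ?_⟩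
        · rw [hI, hE, hi, gct_join_singleton]
          simp [t1, hz, gct_join_nil]
        · rw [hI]
          simp only [t1, beq_self_eq_true, if_true, List.cons_ne_nil, iff_false]
          exact gct_dash_ne _ _
        · rw [hE]; simp [t1, h2']
      · have hne : ¬ PySem.Str.join "\n" (gctIncs rest) = "" := fun h => hi (h1'.mp h)
        refine ⟨?_, ?_, ?_⟩
        · rw [hI, hE, gct_join_cons _ _ hi]
          simp [t1, hne, String.append_assoc]
        · rw [hI]
          simp only [t1, beq_self_eq_true, if_true, List.cons_ne_nil, iff_false]
          exact gct_dash_ne _ _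
        · rw [hE]; simp [t1, h2']
    · by_cases t2 : (PySem.Dict.ofList c).getD "type" "" = "exclusion"
      · have hE : gctExcs (c :: rest)
            = ("- " ++ (PySem.Dict.ofList c).getD "description" "") :: gctExcs rest := by
          simp [gctExcs, t2]
        have hI : gctIncs (c :: rest) = gctIncs rest := by
          simp [gctIncs, t1]
        by_cases hx : gctExcs rest = []
        · have hz : PySem.Str.join "\n" (gctExcs rest) = "" := h2'.mpr hx
          refine ⟨?_, ?_, ?_⟩
          · rw [hI, hE, hx, gct_join_singleton]
            simp [t1, t2, hz, gct_join_nil]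
          · rw [hI]; simp [t1, t2, h1']
          · rw [hE]
            simp only [t1, t2, beq_iff_eq, if_false, beq_self_eq_true, if_true,
              List.cons_ne_nil, iff_false]
            exact gct_dash_ne _ _
        · have hne : ¬ PySem.Str.join "\n" (gctExcs rest) = "" := fun h => hx (h2'.mp h)
          refine ⟨?_, ?_, ?_⟩
          · rw [hI, hE, gct_join_cons _ _ hx]
            simp [t1, t2, hne, String.append_assoc]
          · rw [hI]; simp [t1, t2, h1']
          · rw [hE]
            simp only [t1, t2, beq_iff_eq, if_false, beq_self_eq_true, if_true,
              List.cons_ne_nil, iff_false]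
            exact gct_dash_ne _ _
      · have hI : gctIncs (c :: rest) = gctIncs rest := by simp [gctIncs, t1]
        have hE : gctExcs (c :: rest) = gctExcs rest := by simp [gctExcs, t2]
        refine ⟨?_, ?_, ?_⟩
        · rw [hI, hE]; simp [t1, t2]
        · simp [t1, t2, hI, h1']
        · simp [t1, t2, hE, h2']

theorem gct_glue (sep x y : List Char) (I E : List (List Char)) :
    PySem.Chars.join sep (x :: I ++ [] :: y :: E)
      = PySem.Chars.join sep (x :: I) ++ sep ++ sep ++ PySem.Chars.join sep (y :: E) := by
  induction I generalizing x with
  | nil => simp [PySem.Chars.join_cons_cons, List.append_assoc]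
  | cons a as ih =>
    simp only [List.cons_append, PySem.Chars.join_cons_cons] at *
    simp [ih, List.append_assoc]

-- A equals the "header ++ join section" block form
theorem gct_A_blocks (pc : List (List (String × String))) :
    generate_criteria_text pc =
      PySem.Str.join "\n\n"
        ((if gctIncs pc = [] then [] else
            ["Inclusion Criteria:\n" ++ PySem.Str.join "\n" (gctIncs pc)])
          ++ (if gctExcs pc = [] then [] else
            ["Exclusion Criteria:\n" ++ PySem.Str.join "\n" (gctExcs pc)])) := by
  unfold generate_criteria_text
  rw [gct_fold_eq]
  simp only [List.nil_append]
  have hnl : ("Inclusion Criteria:\n").toList = ("Inclusion Criteria:").toList ++ ("\n" : String).toList := by decide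
  have hnl2 : ("Exclusion Criteria:\n").toList = ("Exclusion Criteria:").toList ++ ("\n" : String).toList := by decide
  have hsep : ("\n\n" : String).toList = ("\n" : String).toList ++ ("\n" : String).toList := by decide
  have hemp : ("" : String).toList = ([] : List Char) := by decide
  rcases hI : gctIncs pc with _ | ⟨i, is⟩ <;>
    rcases hE : gctExcs pc with _ | ⟨e, es⟩ <;>
    simp only [if_true, if_false, List.cons_append, List.nil_append, List.append_nil,
      List.cons_ne_nil]
  · decide
  · apply String.toList_inj.mp
    simp only [PySem.Str.toList_join, List.map_cons, List.map_nil,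
      PySem.Chars.join_singleton, String.toList_append, hnl2]
    rw [PySem.Chars.join_cons_cons]
  · apply String.toList_inj.mp
    simp only [PySem.Str.toList_join, List.map_cons, List.map_nil,
      PySem.Chars.join_singleton, String.toList_append, hnl]
    rw [PySem.Chars.join_cons_cons]
  · apply String.toList_inj.mp
    simp only [PySem.Str.toList_join, List.map_cons, List.map_nil, List.map_append,
      String.toList_append, hnl, hnl2, hsep, hemp]
    conv_rhs => rw [PySem.Chars.join_cons_cons, PySem.Chars.join_singleton]
    rw [show ("Inclusion Criteria:".toList :: i.toList :: (List.map String.toList is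
          ++ [[]] ++ ["Exclusion Criteria:".toList]
          ++ e.toList :: List.map String.toList es) : List (List Char))
        = (("Inclusion Criteria:".toList :: i.toList :: List.map String.toList is)
            ++ [] :: "Exclusion Criteria:".toList :: e.toList :: List.map String.toList es) by
      simp]
    rw [gct_glue]
    rw [PySem.Chars.join_cons_cons]
    rw [PySem.Chars.join_cons_cons]
    simp [List.append_assoc]

-- B equals the same block form
theorem gct_B_blocks (pc : List (List (String × String))) :
    generate_criteria_text_alt pc =
      PySem.Str.join "\n\n"
        ((if gctIncs pc = [] then [] else
            ["Inclusion Criteria:\n" ++ PySem.Str.join "\n" (gctIncs pc)])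
          ++ (if gctExcs pc = [] then [] else
            ["Exclusion Criteria:\n" ++ PySem.Str.join "\n" (gctExcs pc)])) := by
  obtain ⟨heq, h1, h2⟩ := gct_go_eq pc
  have h1' : (PySem.Str.join "\n" (gctIncs pc) = "") ↔ gctIncs pc = [] := by
    rw [heq] at h1; simpa using h1
  have h2' : (PySem.Str.join "\n" (gctExcs pc) = "") ↔ gctExcs pc = [] := by
    rw [heq] at h2; simpa using h2
  unfold generate_criteria_text_alt
  rw [heq]
  by_cases hi : gctIncs pc = [] <;> by_cases hx : gctExcs pc = []
  · simp [hi, hx, h1'.mpr hi, h2'.mpr hx, gct_join_nil]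
  · have hxne : ¬ PySem.Str.join "\n" (gctExcs pc) = "" := fun h => hx (h2'.mp h)
    have hH : ("Exclusion Criteria:\n" ++ PySem.Str.join "\n" (gctExcs pc)) ≠ "" := by
      intro h
      have := congrArg String.toList h
      simp [String.toList_append] at this
    simp [hi, hx, h1'.mpr hi, hxne, hH, gct_join_singleton, gct_join_nil]
  · have hine : ¬ PySem.Str.join "\n" (gctIncs pc) = "" := fun h => hi (h1'.mp h)
    have hH : ("Inclusion Criteria:\n" ++ PySem.Str.join "\n" (gctIncs pc)) ≠ "" := by
      intro h
      have := congrArg String.toList h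
      simp [String.toList_append] at this
    simp [hi, hx, h2'.mpr hx, hine, hH, gct_join_singleton, gct_join_nil]
  · have hine : ¬ PySem.Str.join "\n" (gctIncs pc) = "" := fun h => hi (h1'.mp h)
    have hxne : ¬ PySem.Str.join "\n" (gctExcs pc) = "" := fun h => hx (h2'.mp h)
    have hH1 : ("Inclusion Criteria:\n" ++ PySem.Str.join "\n" (gctIncs pc)) ≠ "" := by
      intro h
      have := congrArg String.toList h
      simp [String.toList_append] at this
    have hH2 : ("Exclusion Criteria:\n" ++ PySem.Str.join "\n" (gctExcs pc)) ≠ "" := by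
      intro h
      have := congrArg String.toList h
      simp [String.toList_append] at this
    simp [hi, hx, hine, hxne, hH1, hH2, gct_join_pair]

-- ===== VERDICT (by name: the statement is the Claim_ definition above) =====
theorem generate_criteria_text_spec : Claim_equal_generate_criteria_text := by
  intro pc _
  show generate_criteria_text pc = generate_criteria_text_alt pc
  rw [gct_A_blocks, gct_B_blocks]
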